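-- pv_equiv track=rewrite | github.com/ninjha01/advent2021 | ten/day10.py | part_two
-- ===== SOURCE A (Python) =====
-- from typing import Dict, FrozenSet, List, Literal, Set, Tuple, Callable, Optional, Union
--
-- opener_closer_map = {"(": ")", "{": "}", "[": "]", "<": ">"}
--
-- closer_opener_map = {v: k for k, v in opener_closer_map.items()}
--
-- def part_two(puzzle: List[List[str]]) -> int:
--     incompletes = []
--     for line in puzzle:
--         balance_stack = []
--         corrupted = False
--         for char in line:
--             if char in opener_closer_map:
--                 balance_stack.append(char)
--             elif char in closer_opener_map:
--                 if (
--                     balance_stack[-1] == closer_opener_map[char]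
--                     and len(balance_stack) > 0
--                 ):  # Correctly closes
--                     balance_stack.pop()
--                 else:  # Incorrectly closes
--                     corrupted = True
--                     break
--         # If incomplete
--         if not corrupted and len(balance_stack) > 0:
--             incompletes.append(balance_stack)
--
--     scores = []
--     score_map = {")": 1, "]": 2, "}": 3, ">": 4}
--     for incomp in incompletes:
--         completion_string = [opener_closer_map[char] for char in incomp[::-1]]
--         score = 0
--         for c in completion_string:
--             score *= 5
--             score += score_map[c]
--         scores.append(score)
--     scores = sorted(scores)
--     return scores[len(scores) // 2]
-- ===== SOURCE B (Python) =====
-- opener_closer_map = {"(": ")", "{": "}", "[": "]", "<": ">"}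
-- closer_opener_map = {v: k for k, v in opener_closer_map.items()}
--
-- def _cancel_once(chars):
--     # one left-to-right pass deleting adjacent matched pairs like "()", "[]"
--     out = []
--     i = 0
--     changed = False
--     while i < len(chars):
--         if (
--             i + 1 < len(chars)
--             and chars[i] in opener_closer_map
--             and opener_closer_map[chars[i]] == chars[i + 1]
--         ):
--             i += 2
--             changed = True
--         else:
--             out.append(chars[i])
--             i += 1
--     return out, changed
--
-- def part_two(puzzle):
--     points = {")": 1, "]": 2, "}": 3, ">": 4}
--     scores = []
--     for line in puzzle:
--         residue = [c for c in line if c in opener_closer_map or c in closer_opener_map]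
--         changed = True
--         while changed:
--             residue, changed = _cancel_once(residue)
--         # irreducible residue: all openers <=> line is incomplete (not corrupted)
--         if residue and all(c in opener_closer_map for c in residue):
--             scores.append(
--                 sum(points[opener_closer_map[c]] * 5 ** i for i, c in enumerate(residue))
--             )
--     return sorted(scores)[len(scores) // 2]
-- ===== Notes on version B (the rewrite author's own statement) =====
-- stated objective: alternative
-- what changed: B replaces A's explicit stack scan with repeated cancellation of adjacent matched bracket pairs to an irreducible residue: a line is incomplete iff its residue is a non-empty string of openers, and its score is computed positionally as sum(points[match(c)]*5^i) over the residue instead of A's reverse completion-string fold; the median is then taken as in A.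
import Mathlib
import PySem

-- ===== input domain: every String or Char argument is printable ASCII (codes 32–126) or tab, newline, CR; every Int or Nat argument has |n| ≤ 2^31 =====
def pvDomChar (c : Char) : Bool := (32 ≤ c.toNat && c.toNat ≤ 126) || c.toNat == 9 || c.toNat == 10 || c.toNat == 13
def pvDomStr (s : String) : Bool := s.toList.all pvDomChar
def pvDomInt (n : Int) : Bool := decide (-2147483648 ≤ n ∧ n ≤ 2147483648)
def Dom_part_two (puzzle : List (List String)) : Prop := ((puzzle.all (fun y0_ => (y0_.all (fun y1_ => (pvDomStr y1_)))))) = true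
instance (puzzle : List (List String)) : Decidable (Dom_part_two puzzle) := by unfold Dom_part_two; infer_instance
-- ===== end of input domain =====

-- B replaces A's stack scan by repeated cancellation of adjacent matched bracket pairs to an
-- irreducible residue (incomplete line ⇔ residue is a non-empty run of openers) and scores the
-- residue positionally as Σ points·5^i (objective: alternative algorithm; return value only).

-- ===== PORT A =====
-- char in opener_closer_map
def pvAOpener (c : String) : Bool := c == "(" || c == "{" || c == "[" || c == "<"
-- char in closer_opener_map
def pvACloser (c : String) : Bool := c == ")" || c == "}" || c == "]" || c == ">"
def pvACloserOpener (c : String) : String :=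
  if c == ")" then "(" else if c == "}" then "{" else if c == "]" then "[" else if c == ">" then "<" else ""
def pvAOpenerCloser (c : String) : String :=
  if c == "(" then ")" else if c == "{" then "}" else if c == "[" then "]" else if c == "<" then ">" else ""
def pvAScoreMap (c : String) : Int :=
  if c == ")" then 1 else if c == "]" then 2 else if c == "}" then 3 else if c == ">" then 4 else 0

-- the inner `for char in line` loop; stack in Python order (top at the END).
-- none = IndexError at balance_stack[-1]; some none = corrupted; some (some st) = final stack
def pvAScan : List String → List String → Option (Option (List String))
  | stack, [] => some (some stack)
  | stack, c :: rest =>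
    if pvAOpener c then pvAScan (stack ++ [c]) rest
    else if pvACloser c then
      match PySem.List.pyGet? stack (-1) with   -- balance_stack[-1], read BEFORE the length test
      | none => none
      | some top => if top == pvACloserOpener c then pvAScan stack.dropLast rest else some none
    else pvAScan stack rest

-- the outer `for line in puzzle` loop building `incompletes` (none = some line raised)
def pvAIncompletes : List (List String) → Option (List (List String))
  | [] => some []
  | line :: rest =>
    match pvAScan [] line with
    | none => none
    | some none => pvAIncompletes rest
    | some (some st) =>
      if st.length > 0 then (pvAIncompletes rest).map (fun is => st :: is)
      else pvAIncompletes rest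

-- completion_string + the score loop for one incomplete stack
def pvAScore (incomp : List String) : Int :=
  let completion := incomp.reverse.map pvAOpenerCloser   -- incomp[::-1] then the comprehension
  completion.foldl (fun score c => score * 5 + pvAScoreMap c) 0

def part_two (puzzle : List (List String)) : Int :=
  match pvAIncompletes puzzle with
  | none => 0   -- Python raises IndexError here; outside Pre_part_two
  | some incs =>
    let scores := incs.map pvAScore
    let scores := PySem.List.sorted scores (fun x => x) false
    (PySem.List.pyGet? scores (PySem.Int.floordiv scores.length 2)).getD 0  -- scores[len(scores)//2]; none (empty scores) = IndexError, outside Pre_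

-- ===== PORT B =====
-- the two module dicts, as association lists; `c in dict` = lookup succeeds
def pvBPairs : List (String × String) := [("(", ")"), ("{", "}"), ("[", "]"), ("<", ">")]
def pvBPointsMap : List (String × Int) := [(")", 1), ("]", 2), ("}", 3), (">", 4)]
def pvBOpen (c : String) : Bool := (pvBPairs.lookup c).isSome
def pvBClose (c : String) : Bool := (pvBPointsMap.lookup c).isSome
def pvBPair (c : String) : String := (pvBPairs.lookup c).getD ""
def pvBPoints (c : String) : Int := (pvBPointsMap.lookup c).getD 0

-- _cancel_once: one left-to-right pass deleting adjacent matched pairs (the while-i loop)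
def pvBCancelOnce : List String → List String × Bool
  | [] => ([], false)
  | [c] => ([c], false)
  | a :: b :: rest =>
    if pvBOpen a && (pvBPair a == b) then
      ((pvBCancelOnce rest).1, true)
    else
      let r := pvBCancelOnce (b :: rest)
      (a :: r.1, r.2)

-- the `while changed` loop; fuel (an upper bound on the number of passes, each pass that
-- changes the list shortens it) only makes the same computation total — never reached 0
def pvBCancelLoop : Nat → List String → List String
  | 0, l => l
  | fuel + 1, l =>
    let r := pvBCancelOnce l
    if r.2 then pvBCancelLoop fuel r.1 else l

def pvBCancel (l : List String) : List String := pvBCancelLoop (l.length + 1) l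

-- the body of `for line in puzzle`: some score if the line is incomplete
def pvBLine (line : List String) : Option Int :=
  let residue := pvBCancel (line.filter (fun c => pvBOpen c || pvBClose c))
  if !residue.isEmpty && residue.all pvBOpen then
    some (((PySem.List.enumerate residue 0).map
      (fun p => pvBPoints (pvBPair p.2) * 5 ^ p.1.toNat)).sum)   -- sum(points[pairs[c]] * 5**i)
  else none

def part_two_alt (puzzle : List (List String)) : Int :=
  let scores := puzzle.filterMap pvBLine
  let scores := PySem.List.sorted scores (fun x => x) false
  (PySem.List.pyGet? scores (PySem.Int.floordiv scores.length 2)).getD 0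

-- ===== PRECONDITION & SPEC =====
-- Pre_'s own line classifier: none = the line makes A raise IndexError at balance_stack[-1],
-- some true = incomplete line (contributes a score), some false = corrupted or complete.
def pvPairOf : String → String
  | "(" => ")"
  | "{" => "}"
  | "[" => "]"
  | "<" => ">"
  | _ => ""
def pvLineStat : List String → List String → Option Bool
  | stack, [] => some (!stack.isEmpty)
  | stack, c :: rest =>
    if c == "(" || c == "{" || c == "[" || c == "<" then pvLineStat (c :: stack) rest
    else if c == ")" || c == "}" || c == "]" || c == ">" then
      match stack with
      | [] => none
      | top :: s => if pvPairOf top == c then pvLineStat s rest else some false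
    else pvLineStat stack rest

-- Pre_ excludes exactly the inputs where A raises IndexError: a closer reached with an empty
-- stack on some line, or no incomplete line at all (median of an empty score list).
def Pre_part_two (puzzle : List (List String)) : Prop :=
  (∀ line ∈ puzzle, pvLineStat [] line ≠ none) ∧ (∃ line ∈ puzzle, pvLineStat [] line = some true)
instance (puzzle : List (List String)) : Decidable (Pre_part_two puzzle) := by
  unfold Pre_part_two; infer_instance

def pvWitness_part_two : List (List String) := [["(", "["]]

def Spec_part_two (puzzle : List (List String)) (out : Int) : Prop := out = part_two_alt puzzle
instance (puzzle : List (List String)) (out : Int) : Decidable (Spec_part_two puzzle out) := by unfold Spec_part_two; infer_instance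

-- ===== CLAIM (what is proved, stated in full; the proofs are below) =====
def Claim_equal_part_two : Prop := ∀ (puzzle : List (List String)), Dom_part_two puzzle → Pre_part_two puzzle → Spec_part_two puzzle (part_two puzzle)

-- ===== LEMMAS AND PROOFS =====

-- the proof-side scan: A's inner loop with the stack as a cons list (top at the HEAD)
def pvScanC : List String → List String → Option (Option (List String))
  | stack, [] => some (some stack)
  | stack, c :: rest =>
    if pvBOpen c then pvScanC (c :: stack) rest
    else if pvBClose c then
      match stack with
      | [] => none
      | top :: s => if pvBPair top == c then pvScanC s rest else some none
    else pvScanC stack rest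

lemma pvBOpen_iff (c : String) : pvBOpen c = (c == "(" || c == "{" || c == "[" || c == "<") := by
  simp only [pvBOpen, pvBPairs, List.lookup]
  cases h1 : c == "(" <;> cases h2 : c == "{" <;> cases h3 : c == "[" <;>
    cases h4 : c == "<" <;> simp

lemma pvBClose_iff (c : String) : pvBClose c = (c == ")" || c == "}" || c == "]" || c == ">") := by
  simp only [pvBClose, pvBPointsMap, List.lookup]
  cases h1 : c == ")" <;> cases h2 : c == "}" <;> cases h3 : c == "]" <;>
    cases h4 : c == ">" <;> simp

lemma open_eq (c : String) : pvBOpen c = pvAOpener c := by rw [pvBOpen_iff]; rfl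
lemma close_eq (c : String) : pvBClose c = pvACloser c := by rw [pvBClose_iff]; rfl

lemma pair_eq (c : String) : pvBPair c = pvAOpenerCloser c := by
  simp only [pvBPair, pvBPairs, List.lookup, pvAOpenerCloser]
  cases h1 : c == "(" <;> cases h2 : c == "{" <;> cases h3 : c == "[" <;>
    cases h4 : c == "<" <;> simp

lemma points_eq (c : String) : pvBPoints c = pvAScoreMap c := by
  simp only [pvBPoints, pvBPointsMap, List.lookup, pvAScoreMap]
  cases h1 : c == ")" <;> cases h2 : c == "]" <;> cases h3 : c == "}" <;>
    cases h4 : c == ">" <;> simp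

lemma pairOf_eq (c : String) : pvPairOf c = pvBPair c := by
  rw [pair_eq]
  by_cases h1 : c = "(" <;> by_cases h2 : c = "{" <;> by_cases h3 : c = "[" <;>
    by_cases h4 : c = "<" <;> simp_all [pvPairOf, pvAOpenerCloser]

lemma open_cases (a : String) (ha : pvBOpen a = true) :
    a = "(" ∨ a = "{" ∨ a = "[" ∨ a = "<" := by
  rw [pvBOpen_iff] at ha
  simpa [or_assoc] using ha

lemma pvMatch_eq (top c : String) (hc : pvACloser c = true) :
    (top == pvACloserOpener c) = (pvBPair top == c) := by
  rw [pair_eq]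
  simp only [pvACloser, Bool.or_eq_true, beq_iff_eq] at hc
  unfold pvAOpenerCloser pvACloserOpener
  rcases hc with ((h | h) | h) | h <;> subst h <;>
    by_cases h1 : top = "(" <;> by_cases h2 : top = "{" <;>
      by_cases h3 : top = "[" <;> by_cases h4 : top = "<" <;> simp_all

-- A's scan on the Python-order stack is the cons-stack scan on the reversed stack
lemma scanAC (l : List String) : ∀ st : List String,
    pvAScan st l = (pvScanC st.reverse l).map (Option.map List.reverse) := by
  induction l with
  | nil => intro st; simp [pvAScan, pvScanC]
  | cons c rest ih =>
    intro st
    simp only [pvAScan, pvScanC]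
    by_cases ho : pvAOpener c
    · have ho' : pvBOpen c = true := by rw [open_eq]; exact ho
      simpa [ho, ho'] using ih (st ++ [c])
    · have ho' : pvBOpen c = false := by rw [open_eq]; simpa using ho
      by_cases hc : pvACloser c
      · have hc' : pvBClose c = true := by rw [close_eq]; exact hc
        rcases st.eq_nil_or_concat with rfl | ⟨init, top, rfl⟩
        · simp [ho, ho', hc, hc', PySem.List.pyGet?]
        · simp only [List.concat_eq_append, if_neg ho, ho', Bool.false_eq_true, if_pos hc, hc',
            if_pos, PySem.List.pyGet?_neg_one_append_singleton, List.reverse_append,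
            List.reverse_cons, List.reverse_nil, List.nil_append, List.singleton_append, if_neg]
          rw [pvMatch_eq top c hc]
          by_cases hm : (pvBPair top == c) = true
          · simpa [hm, List.dropLast_concat] using ih init
          · simp [hm]
      · have hc' : pvBClose c = false := by rw [close_eq]; simpa using hc
        simpa [ho, ho', hc, hc'] using ih st

-- non-bracket characters are skipped by the scan
lemma scanC_filter (l : List String) : ∀ st,
    pvScanC st (l.filter (fun c => pvBOpen c || pvBClose c)) = pvScanC st l := by
  induction l with
  | nil => intro st; rfl
  | cons c rest ih =>
    intro st
    by_cases ho : pvBOpen c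
    · simp [List.filter_cons, ho, pvScanC, ih]
    · by_cases hcl : pvBClose c
      · cases st with
        | nil => simp [List.filter_cons, ho, hcl, pvScanC]
        | cons t s =>
          by_cases hm : (pvBPair t == c) = true <;>
            simp [List.filter_cons, ho, hcl, pvScanC, hm, ih]
      · simp [List.filter_cons, ho, hcl, pvScanC, ih]

-- a matched pair "x pair(x)" has an opener then a closer that pops it: removing it is invisible
lemma open_pair (a : String) (ha : pvBOpen a = true) :
    pvBOpen (pvBPair a) = false ∧ pvBClose (pvBPair a) = true := by
  rcases open_cases a ha with h | h | h | h <;> subst h <;> decide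

-- one cancellation pass preserves the scan outcome
lemma scanC_cancelOnce (l : List String) : ∀ st,
    pvScanC st (pvBCancelOnce l).1 = pvScanC st l := by
  induction l using pvBCancelOnce.induct with
  | case1 => intro st; rfl
  | case2 c => intro st; rfl
  | case3 a b rest hab ih =>
    intro st
    have ha : pvBOpen a = true := by
      rcases Bool.and_eq_true .. ▸ hab with ⟨h, _⟩; exact h
    have hb : b = pvBPair a := by
      rcases Bool.and_eq_true .. ▸ hab with ⟨_, h⟩; exact (beq_iff_eq.mp h).symm
    subst hb
    rcases open_pair a ha with ⟨hbo, hbc⟩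
    simp [pvBCancelOnce, hab, pvScanC, ha, hbo, hbc, ih]
  | case4 a b rest hab ih =>
    intro st
    simp only [pvBCancelOnce, hab]
    by_cases ho : pvBOpen a
    · simpa [pvScanC, ho] using ih (a :: st)
    · by_cases hcl : pvBClose a
      · cases st with
        | nil => simp [pvScanC, ho, hcl]
        | cons t s =>
          by_cases hm : (pvBPair t == a) = true <;>
            simp [pvScanC, ho, hcl, hm, ih]
      · simpa [pvScanC, ho, hcl] using ih st

lemma scanC_cancelLoop (fuel : Nat) : ∀ l st, pvScanC st (pvBCancelLoop fuel l) = pvScanC st l := by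
  induction fuel with
  | zero => intro l st; rfl
  | succ n ih =>
    intro l st
    by_cases h : (pvBCancelOnce l).2 = true
    · simp only [pvBCancelLoop, h, if_true]
      rw [ih, scanC_cancelOnce]
    · simp [pvBCancelLoop, h]

lemma scanC_cancel (l : List String) (st : List String) :
    pvScanC st (pvBCancel l) = pvScanC st l := scanC_cancelLoop _ l st

-- a changing pass strictly shortens the list
lemma pvBCancelOnce_len (l : List String) :
    (pvBCancelOnce l).1.length ≤ l.length ∧
      ((pvBCancelOnce l).2 = true → (pvBCancelOnce l).1.length < l.length) := by
  induction l using pvBCancelOnce.induct with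
  | case1 => simp [pvBCancelOnce]
  | case2 c => simp [pvBCancelOnce]
  | case3 a b rest hab ih =>
    simp only [pvBCancelOnce, hab]
    exact ⟨by simpa using Nat.le_succ_of_le (Nat.le_succ_of_le ih.1),
           fun _ => by simpa using Nat.lt_succ_of_lt (Nat.lt_succ_of_le ih.1)⟩
  | case4 a b rest hab ih =>
    simp only [pvBCancelOnce, hab]
    exact ⟨by simpa using Nat.succ_le_succ ih.1,
           fun h => by simpa using Nat.succ_lt_succ (ih.2 h)⟩

-- with enough fuel the loop reaches an irreducible residue
lemma cancelLoop_irred (fuel : Nat) : ∀ l, l.length < fuel →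
    (pvBCancelOnce (pvBCancelLoop fuel l)).2 = false := by
  induction fuel with
  | zero => intro l h; omega
  | succ n ih =>
    intro l h
    by_cases hc : (pvBCancelOnce l).2 = true
    · simp only [pvBCancelLoop, hc, if_true]
      exact ih _ (by have := (pvBCancelOnce_len l).2 hc; omega)
    · simpa [pvBCancelLoop, hc] using (by simpa using hc)

lemma cancel_irred (l : List String) : (pvBCancelOnce (pvBCancel l)).2 = false :=
  cancelLoop_irred _ l (Nat.lt_succ_self _)

lemma cancelOnce_sub (l : List String) : ∀ c ∈ (pvBCancelOnce l).1, c ∈ l := by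
  induction l using pvBCancelOnce.induct with
  | case1 => simp [pvBCancelOnce]
  | case2 c => simp [pvBCancelOnce]
  | case3 a b rest hab ih =>
    intro c hc
    simp only [pvBCancelOnce, hab] at hc
    simp [ih c hc]
  | case4 a b rest hab ih =>
    intro c hc
    simp only [pvBCancelOnce, hab] at hc
    rcases List.mem_cons.mp hc with h | hc2
    · simp [h]
    · simpa using Or.inr (ih c hc2)

lemma cancelLoop_sub (fuel : Nat) : ∀ l, ∀ c ∈ pvBCancelLoop fuel l, c ∈ l := by
  induction fuel with
  | zero => intro l c hc; exact hc
  | succ n ih =>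
    intro l c hc
    by_cases h : (pvBCancelOnce l).2 = true
    · simp only [pvBCancelLoop, h, if_true] at hc
      exact cancelOnce_sub l c (ih _ c hc)
    · simpa [pvBCancelLoop, h] using hc

-- no adjacent opener followed by its matching closer
def pvNoAdj : List String → Prop
  | [] => True
  | [_] => True
  | a :: b :: rest => (pvBOpen a = true → pvBPair a ≠ b) ∧ pvNoAdj (b :: rest)

lemma noAdj_tail (a : String) (rest : List String) (h : pvNoAdj (a :: rest)) : pvNoAdj rest := by
  cases rest with
  | nil => trivial
  | cons b r => exact h.2

lemma noAdj_head (a : String) (rest : List String) (h : pvNoAdj (a :: rest)) :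
    ∀ x, rest.head? = some x → pvBOpen a = true → pvBPair a ≠ x := by
  intro x hx
  cases rest with
  | nil => simp at hx
  | cons b r =>
    simp only [List.head?_cons, Option.some.injEq] at hx
    subst hx
    exact h.1

-- an irreducible list has no adjacent opener + matching closer
lemma irred_chain (l : List String) (h : (pvBCancelOnce l).2 = false) : pvNoAdj l := by
  induction l using pvBCancelOnce.induct with
  | case1 => trivial
  | case2 c => trivial
  | case3 a b rest hab ih => simp [pvBCancelOnce, hab] at h
  | case4 a b rest hab ih =>
    simp only [pvBCancelOnce, hab] at h
    refine ⟨fun ho heq => hab (by simp [ho, heq]), ih h⟩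

-- a run of openers just gets pushed
lemma scan_openers (l : List String) (h : l.all pvBOpen = true) : ∀ st,
    pvScanC st l = some (some (l.reverse ++ st)) := by
  induction l with
  | nil => intro st; simp [pvScanC]
  | cons a rest ih =>
    intro st
    simp only [List.all_cons, Bool.and_eq_true] at h
    simp [pvScanC, h.1, ih h.2]

-- an irreducible bracket list containing a closer scans to an error or corruption
lemma scan_closer (l : List String) :
    ∀ st, pvNoAdj l →
    (∀ c ∈ l, (pvBOpen c || pvBClose c) = true) → l.all pvBOpen = false →
    (∀ t h, st.head? = some t → l.head? = some h → pvBPair t ≠ h) →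
    pvScanC st l = none ∨ pvScanC st l = some none := by
  induction l with
  | nil => intro st _ _ hall _; simp at hall
  | cons a rest ih =>
    intro st hch hbr hall hst
    by_cases ho : pvBOpen a = true
    · have hrest : rest.all pvBOpen = false := by
        simp only [List.all_cons, ho, Bool.true_and] at hall; exact hall
      simp only [pvScanC, ho, if_true]
      refine ih (a :: st) (noAdj_tail a rest hch) (fun c hc => hbr c (List.mem_cons_of_mem _ hc)) hrest ?_
      intro t h ht hh
      simp only [List.head?_cons, Option.some.injEq] at ht
      subst ht
      exact noAdj_head a rest hch h hh ho
    · have hcl : pvBClose a = true := by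
        have := hbr a (List.mem_cons_self ..)
        simpa [ho] using this
      cases st with
      | nil => left; simp [pvScanC, ho, hcl]
      | cons t s =>
        right
        have hne : pvBPair t ≠ a := hst t a rfl rfl
        simp [pvScanC, ho, hcl, hne]

-- B's positional score equals A's reverse completion-string fold
lemma score_enum_aux (f : String → Int) (l : List String) : ∀ s : Nat,
    ((PySem.List.enumerate l (s : Int)).map (fun p => f p.2 * 5 ^ p.1.toNat)).sum
      = 5 ^ s * (l.reverse.foldl (fun sc c => sc * 5 + f c) 0) := by
  induction l with
  | nil => intro s; simp [PySem.List.enumerate_nil]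
  | cons a t ih =>
    intro s
    have hcast : ((s : Int) + 1) = ((s + 1 : Nat) : Int) := by push_cast; ring
    rw [PySem.List.enumerate_cons, List.map_cons, List.sum_cons, hcast, ih (s + 1)]
    rw [List.reverse_cons, List.foldl_append]
    simp only [List.foldl_cons, List.foldl_nil, Int.toNat_natCast]
    ring

lemma score_eq (l : List String) :
    ((PySem.List.enumerate l 0).map (fun p => pvBPoints (pvBPair p.2) * 5 ^ p.1.toNat)).sum
      = pvAScore l := by
  have h := score_enum_aux (fun c => pvBPoints (pvBPair c)) l 0
  simp only [Nat.cast_zero, pow_zero, one_mul] at h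
  rw [h]
  simp only [pvAScore]
  rw [List.foldl_map]
  simp only [pair_eq, points_eq]

-- per line: A's scan and B's residue test classify identically and give the same score
lemma cancel_sub (l : List String) : ∀ c ∈ pvBCancel l, c ∈ l := cancelLoop_sub _ l

lemma line_cases (line : List String) (hline : pvScanC [] line ≠ none) :
    (pvBLine line = none ∧ (pvAScan [] line = some none ∨ pvAScan [] line = some (some [])))
    ∨ (∃ r, r ≠ [] ∧ pvAScan [] line = some (some r) ∧ pvBLine line = some (pvAScore r)) := by
  have hAs := scanAC line ([] : List String)
  simp only [List.reverse_nil] at hAs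
  obtain ⟨br, hbr⟩ : ∃ br, line.filter (fun c => pvBOpen c || pvBClose c) = br := ⟨_, rfl⟩
  obtain ⟨r, hrr⟩ : ∃ r, pvBCancel br = r := ⟨_, rfl⟩
  have hscan : pvScanC [] line = pvScanC [] r := by
    rw [← hrr, scanC_cancel, ← hbr, scanC_filter]
  have hBdef : pvBLine line = (if !r.isEmpty && r.all pvBOpen then
      some (((PySem.List.enumerate r 0).map
        (fun p => pvBPoints (pvBPair p.2) * 5 ^ p.1.toNat)).sum) else none) := by
    simp only [pvBLine, hbr, hrr]
  by_cases hop : (!r.isEmpty && r.all pvBOpen) = true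
  · right
    have hall : r.all pvBOpen = true := ((Bool.and_eq_true _ _).mp hop).2
    have hne : r ≠ [] := by simpa [List.isEmpty_iff] using ((Bool.and_eq_true _ _).mp hop).1
    refine ⟨r, hne, ?_, ?_⟩
    · rw [hAs, hscan, scan_openers r hall]; simp
    · rw [hBdef, if_pos hop, score_eq]
  · left
    refine ⟨by rw [hBdef, if_neg hop], ?_⟩
    have hcases : r = [] ∨ r.all pvBOpen = false := by
      by_cases hnil : r = []
      · exact Or.inl hnil
      · right
        by_contra hfa
        exact hop (by simp [List.isEmpty_iff, hnil,
          (by simpa using hfa : r.all pvBOpen = true)])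
    rcases hcases with hrnil | hcl
    · right
      rw [hAs, hscan, hrnil]
      simp [pvScanC]
    · have hchain := irred_chain r (hrr ▸ cancel_irred br)
      have hbrm : ∀ c ∈ r, (pvBOpen c || pvBClose c) = true := by
        intro c hc
        have h2 := cancel_sub br c (hrr ▸ hc)
        rw [← hbr] at h2
        exact (List.mem_filter.mp h2).2
      rcases scan_closer r [] hchain hbrm hcl (by intro t h ht; simp at ht) with h | h
      · rw [hscan] at hline; exact absurd h hline
      · left; rw [hAs, hscan, h]; simp

-- the main correspondence: A's incompletes-then-score equals B's fused per-line scores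
lemma main_scores : ∀ pz : List (List String), (∀ line ∈ pz, pvScanC [] line ≠ none) →
    (pvAIncompletes pz).map (List.map pvAScore) = some (pz.filterMap pvBLine) := by
  intro pz
  induction pz with
  | nil => intro _; simp [pvAIncompletes]
  | cons line rest ih =>
    intro hno
    have hrest := ih (fun l hl => hno l (List.mem_cons_of_mem _ hl))
    obtain ⟨incs, hincs⟩ : ∃ incs, pvAIncompletes rest = some incs := by
      cases h : pvAIncompletes rest with
      | none => rw [h] at hrest; simp at hrest
      | some v => exact ⟨v, rfl⟩
    rw [hincs] at hrest
    simp only [Option.map_some, Option.some.injEq] at hrest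
    rcases line_cases line (hno line (List.mem_cons_self ..)) with ⟨hB, hA | hA⟩ | ⟨r, hne, hA, hB⟩
    · simp only [pvAIncompletes, hA, List.filterMap_cons, hB, hincs, Option.map_some,
        Option.some.injEq]
      exact hrest
    · simp only [pvAIncompletes, hA, List.length_nil, gt_iff_lt, Nat.lt_irrefl, if_false,
        List.filterMap_cons, hB, hincs, Option.map_some, Option.some.injEq]
      exact hrest
    · have hlen : r.length > 0 := List.length_pos_iff.mpr hne
      simp only [pvAIncompletes, hA, hlen, if_pos, hincs, Option.map_some, List.map_cons,
        Option.some.injEq, List.filterMap_cons, hB]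
      simp [hrest]

-- Pre_'s classifier agrees with the proof-side scan
lemma stat_scanC (l : List String) : ∀ st,
    pvLineStat st l = (pvScanC st l).map (fun o => match o with
      | none => false
      | some s => !s.isEmpty) := by
  induction l with
  | nil => intro st; simp [pvLineStat, pvScanC]
  | cons c rest ih =>
    intro st
    by_cases ho : pvBOpen c = true
    · have ho' : (c == "(" || c == "{" || c == "[" || c == "<") = true := by
        rw [← pvBOpen_iff]; exact ho
      simp only [pvLineStat, pvScanC, ho, ho', if_true]
      exact ih (c :: st)
    · have ho2 : pvBOpen c = false := by simpa using ho
      have ho' : (c == "(" || c == "{" || c == "[" || c == "<") = false := by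
        rw [← pvBOpen_iff]; exact ho2
      by_cases hc : pvBClose c = true
      · have hc' : (c == ")" || c == "}" || c == "]" || c == ">") = true := by
          rw [← pvBClose_iff]; exact hc
        cases st with
        | nil => simp [pvLineStat, pvScanC, ho2, hc, ho', hc']
        | cons t s =>
          have hpair : pvPairOf t = pvBPair t := pairOf_eq t
          by_cases hm : (pvBPair t == c) = true <;>
            simp [pvLineStat, pvScanC, ho2, hc, ho', hc', hpair, hm, ih]
      · have hc2 : pvBClose c = false := by simpa using hc
        have hc' : (c == ")" || c == "}" || c == "]" || c == ">") = false := by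
          rw [← pvBClose_iff]; exact hc2
        simp only [pvLineStat, pvScanC, ho2, hc2, ho', hc', if_false, Bool.false_eq_true]
        exact ih st

lemma stat_ne_none (l : List String) (h : pvLineStat [] l ≠ none) : pvScanC [] l ≠ none := by
  rw [stat_scanC] at h
  intro hn
  rw [hn] at h
  exact h rfl

-- ===== VERDICT (by name: the statement is the Claim_ definition above) =====
theorem part_two_spec : Claim_equal_part_two := by
  intro puzzle _ hpre
  unfold Spec_part_two part_two part_two_alt
  have h := main_scores puzzle (fun l hl => stat_ne_none l (hpre.1 l hl))
  cases hA : pvAIncompletes puzzle with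
  | none => rw [hA] at h; simp at h
  | some incs =>
    rw [hA] at h
    simp only [Option.map_some, Option.some.injEq] at h
    simp only [h]
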